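-- pv_equiv track=rewrite | github.com/codemxde/data-structures-algorithms | 02. Introduction to Problem Solving I/04. Prefix Sum/Assignment/Q4. Special Index (Medium)/Python/main.py | createPrefixSumArrays
-- ===== SOURCE A (Python) =====
-- def createPrefixSumArrays(arr: list):
--     pSumEven = [0] * len(arr)
--     pSumOdd = [0] * len(arr)
--
--     # initialising values at index 0
--     pSumEven[0] = arr[0]
--     pSumOdd[0] = 0
--
--     for i in range(1, len(arr)):
--         if i % 2 == 0:
--             pSumEven[i] = pSumEven[i - 1] + arr[i]
--             pSumOdd[i] = pSumOdd[i - 1]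
--         else:
--             pSumOdd[i] = pSumOdd[i - 1] + arr[i]
--             pSumEven[i] = pSumEven[i - 1]
--     return pSumEven, pSumOdd
-- ===== SOURCE B (Python) =====
-- def createPrefixSumArrays(arr: list):
--     # Two masked value sequences (index 0 counts as even), each turned into a
--     # running sum, instead of A's single interleaved index loop with in-place writes.
--     evenVals = [x if i % 2 == 0 else 0 for i, x in enumerate(arr)]
--     oddVals = [0 if i % 2 == 0 else x for i, x in enumerate(arr)]
--
--     def running(vals):
--         out, s = [], 0
--         for v in vals:
--             s += v
--             out.append(s)
--         return out
--
--     return running(evenVals), running(oddVals)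
-- ===== Notes on version B (the rewrite author's own statement) =====
-- stated objective: alternative
-- what changed: Replaces A's single interleaved index loop with in-place writes into preallocated arrays by two masked value sequences (even/odd positions) each accumulated by an independent running-sum pass appending to a fresh list.
import Mathlib
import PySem

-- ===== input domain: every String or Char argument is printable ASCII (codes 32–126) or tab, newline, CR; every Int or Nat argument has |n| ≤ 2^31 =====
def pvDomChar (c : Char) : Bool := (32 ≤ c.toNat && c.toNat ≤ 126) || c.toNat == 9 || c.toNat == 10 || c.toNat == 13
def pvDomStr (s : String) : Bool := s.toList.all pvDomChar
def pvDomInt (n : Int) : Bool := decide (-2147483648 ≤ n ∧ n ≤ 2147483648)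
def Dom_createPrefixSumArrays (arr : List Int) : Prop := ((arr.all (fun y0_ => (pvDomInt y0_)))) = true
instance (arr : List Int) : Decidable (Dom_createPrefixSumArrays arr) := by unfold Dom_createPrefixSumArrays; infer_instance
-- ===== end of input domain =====

-- B replaces A's single interleaved index loop writing into preallocated arrays by two
-- masked value sequences each accumulated by an independent running-sum pass (alternative
-- decomposition, same O(n) cost); on [] A raises IndexError while B returns ([], []).

-- ===== PORT A =====
-- loop body of A's `for i in range(1, len(arr))`, as a named helper (same steps, same order)
def pvStepA (arr : List Int) (st : List Int × List Int) (i : Int) : List Int × List Int :=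
  if PySem.Int.mod i 2 = 0 then
    (PySem.List.pySetD st.1 i (PySem.List.pyGetD st.1 (i - 1) 0 + PySem.List.pyGetD arr i 0),
     PySem.List.pySetD st.2 i (PySem.List.pyGetD st.2 (i - 1) 0))
  else
    (PySem.List.pySetD st.1 i (PySem.List.pyGetD st.1 (i - 1) 0),
     PySem.List.pySetD st.2 i (PySem.List.pyGetD st.2 (i - 1) 0 + PySem.List.pyGetD arr i 0))

def createPrefixSumArrays (arr : List Int) : List Int × List Int :=
  let pSumEven : List Int := List.replicate arr.length 0
  let pSumOdd : List Int := List.replicate arr.length 0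
  match PySem.List.pyGet? arr 0 with
  | none => ([], [])  -- arr[0] raises IndexError on the empty list; excluded by Pre_
  | some a0 =>
    let pSumEven := PySem.List.pySetD pSumEven 0 a0
    let pSumOdd := PySem.List.pySetD pSumOdd 0 0
    (PySem.List.pyRange 1 (arr.length : Int) 1).foldl (pvStepA arr) (pSumEven, pSumOdd)

-- ===== PORT B =====
-- Source B's inner helper `running`: fold appending the running sum
def pvRunning (vals : List Int) : List Int :=
  (vals.foldl (fun (st : List Int × Int) v => (st.1 ++ [st.2 + v], st.2 + v)) ([], 0)).1

def createPrefixSumArrays_alt (arr : List Int) : List Int × List Int :=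
  let evenVals : List Int :=
    (PySem.List.enumerate arr).map (fun p => if PySem.Int.mod p.1 2 = 0 then p.2 else 0)
  let oddVals : List Int :=
    (PySem.List.enumerate arr).map (fun p => if PySem.Int.mod p.1 2 = 0 then 0 else p.2)
  (pvRunning evenVals, pvRunning oddVals)

-- ===== PRECONDITION & SPEC =====
-- Pre_ excludes only the empty list, on which A raises IndexError (arr[0]).
def Pre_createPrefixSumArrays (arr : List Int) : Prop := arr ≠ []
instance (arr : List Int) : Decidable (Pre_createPrefixSumArrays arr) := by
  unfold Pre_createPrefixSumArrays; infer_instance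

def pvWitness_createPrefixSumArrays : List Int := [3, 1, 2]

def Spec_createPrefixSumArrays (arr : List Int) (out : List Int × List Int) : Prop :=
  out = createPrefixSumArrays_alt arr
instance (arr : List Int) (out : List Int × List Int) : Decidable (Spec_createPrefixSumArrays arr out) := by
  unfold Spec_createPrefixSumArrays; infer_instance

-- ===== CLAIM (what is proved, stated in full; the proofs are below) =====
def Claim_equal_createPrefixSumArrays : Prop :=
  ∀ (arr : List Int), Dom_createPrefixSumArrays arr → Pre_createPrefixSumArrays arr →
    Spec_createPrefixSumArrays arr (createPrefixSumArrays arr)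

-- ===== LEMMAS AND PROOFS =====

-- reference form of Source B's running sums
def pvScan (s : Int) : List Int → List Int
  | [] => []
  | v :: t => (s + v) :: pvScan (s + v) t

theorem pvRunning_aux (vals : List Int) : ∀ (out : List Int) (s : Int),
    (vals.foldl (fun (st : List Int × Int) v => (st.1 ++ [st.2 + v], st.2 + v)) (out, s)).1
      = out ++ pvScan s vals := by
  induction vals with
  | nil => intro out s; simp [pvScan]
  | cons v t ih => intro out s; simp [List.foldl, pvScan, ih]

theorem pvRunning_eq_scan (vals : List Int) : pvRunning vals = pvScan 0 vals := by
  simpa using pvRunning_aux vals [] 0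

theorem pvScan_length (vals : List Int) : ∀ s : Int, (pvScan s vals).length = vals.length := by
  induction vals with
  | nil => intro s; rfl
  | cons v t ih => intro s; simp [pvScan, ih]

theorem pvScan_getD (vals : List Int) : ∀ (s : Int) (j : Nat), j < vals.length →
    (pvScan s vals).getD j 0 = s + (vals.take (j + 1)).sum := by
  induction vals with
  | nil => intro s j h; simp at h
  | cons v t ih =>
    intro s j h
    cases j with
    | zero => simp [pvScan]
    | succ k =>
      simp only [pvScan, List.getD_cons_succ, List.take_succ_cons, List.sum_cons]
      rw [ih (s + v) k (by simpa using h)]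
      ring

theorem pvScan_getD_succ (vals : List Int) (j : Nat) (h : j + 1 < vals.length) :
    (pvScan 0 vals).getD (j + 1) 0 = (pvScan 0 vals).getD j 0 + vals.getD (j + 1) 0 := by
  rw [pvScan_getD vals 0 (j + 1) h, pvScan_getD vals 0 j (by omega),
    List.getD_eq_getElem _ _ h, List.sum_take_succ vals (j + 1) h]
  ring

-- masked sequence entries
theorem pvMask_getD (arr : List Int) (f : Int × Int → Int) (j : Nat) (hj : j < arr.length) :
    ((PySem.List.enumerate arr).map f).getD j 0 = f ((j : Int), arr[j]) := by
  have hl : j < ((PySem.List.enumerate arr).map f).length := by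
    simp [PySem.List.length_enumerate, hj]
  rw [List.getD_eq_getElem _ _ hl, List.getElem_map, PySem.List.getElem_enumerate]
  simp

-- partially-written state of A's arrays: first m entries of T, zeros beyond
def pvState (n : Nat) (T : List Int) (m : Nat) : List Int :=
  (List.range n).map (fun j => if j < m then T.getD j 0 else 0)

theorem pvState_length (n : Nat) (T : List Int) (m : Nat) : (pvState n T m).length = n := by
  simp [pvState]

theorem pvState_getD (n : Nat) (T : List Int) (m j : Nat) (hj : j < n) :
    (pvState n T m).getD j 0 = if j < m then T.getD j 0 else 0 := by
  have hl : j < (pvState n T m).length := by rw [pvState_length]; exact hj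
  rw [List.getD_eq_getElem _ _ hl]
  simp [pvState]

theorem pvState_set (n : Nat) (T : List Int) (m : Nat) (v : Int) (_hm : m < n)
    (hv : v = T.getD m 0) : (pvState n T m).set m v = pvState n T (m + 1) := by
  apply List.ext_getElem
  · simp [pvState_length]
  · intro j h1 h2
    have hj : j < n := by simpa [pvState_length] using h2
    rw [List.getElem_set]
    by_cases hjm : m = j
    · subst hjm
      rw [if_pos rfl]
      simp only [pvState, List.getElem_map, List.getElem_range]
      rw [if_pos (Nat.lt_succ_self m)]
      exact hv
    · rw [if_neg hjm]
      simp only [pvState, List.getElem_map, List.getElem_range]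
      by_cases h : j < m
      · rw [if_pos h, if_pos (by omega)]
      · rw [if_neg h, if_neg (by omega)]

theorem pvState_init (n : Nat) (T : List Int) (_hn : 0 < n) :
    (List.replicate n (0 : Int)).set 0 (T.getD 0 0) = pvState n T 1 := by
  apply List.ext_getElem
  · simp [pvState_length]
  · intro j h1 h2
    have hj : j < n := by simpa [pvState_length] using h2
    rw [List.getElem_set]
    by_cases h : 0 = j
    · subst h; simp [pvState]
    · rw [if_neg h]
      simp only [List.getElem_replicate, pvState, List.getElem_map, List.getElem_range]
      rw [if_neg (by omega)]

theorem pvState_full (n : Nat) (T : List Int) (hT : T.length = n) :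
    pvState n T n = T := by
  apply List.ext_getElem
  · simp [pvState_length, hT]
  · intro j h1 h2
    simp only [pvState, List.getElem_map, List.getElem_range]
    rw [if_pos (by simpa [pvState_length] using h1)]
    exact List.getD_eq_getElem T 0 h2

-- the recurrence A's loop implements, satisfied by B's running sums
theorem pv_loop_inv (arr E O : List Int)
    (_hEl : E.length = arr.length) (_hOl : O.length = arr.length)
    (hE : ∀ j : Nat, j + 1 < arr.length →
      E.getD (j + 1) 0 = if (j + 1) % 2 = 0 then E.getD j 0 + arr.getD (j + 1) 0 else E.getD j 0)
    (hO : ∀ j : Nat, j + 1 < arr.length →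
      O.getD (j + 1) 0 = if (j + 1) % 2 = 0 then O.getD j 0 else O.getD j 0 + arr.getD (j + 1) 0) :
    ∀ m : Nat, 1 ≤ m → m ≤ arr.length →
      (PySem.List.pyRange 1 (m : Int) 1).foldl (pvStepA arr)
          (pvState arr.length E 1, pvState arr.length O 1)
        = (pvState arr.length E m, pvState arr.length O m) := by
  intro m
  induction m with
  | zero => intro h; omega
  | succ k ih =>
    intro _ hle
    by_cases hk : k = 0
    · subst hk
      rw [show ((1 : Nat) : Int) = 1 by norm_num, PySem.List.pyRange_one_eq_nil (by norm_num)]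
      rfl
    · have hk1 : 1 ≤ k := by omega
      have hcast : ((k + 1 : Nat) : Int) = (k : Int) + 1 := by push_cast; ring
      rw [hcast, PySem.List.pyRange_one_succ_right (by exact_mod_cast hk1), List.foldl_append,
        ih hk1 (by omega)]
      have hkn : k < arr.length := by omega
      have hmod : PySem.Int.mod (k : Int) 2 = (((k % 2 : Nat)) : Int) := by
        exact_mod_cast PySem.Int.mod_natCast k 2
      have hsub : ((k : Int) - 1) = ((k - 1 : Nat) : Int) := by
        push_cast [hk1]; ring
      have hgetE : PySem.List.pyGetD (pvState arr.length E k) ((k : Int) - 1) 0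
          = E.getD (k - 1) 0 := by
        rw [hsub, PySem.List.pyGetD_natCast, pvState_getD _ _ _ _ (by omega), if_pos (by omega)]
      have hgetO : PySem.List.pyGetD (pvState arr.length O k) ((k : Int) - 1) 0
          = O.getD (k - 1) 0 := by
        rw [hsub, PySem.List.pyGetD_natCast, pvState_getD _ _ _ _ (by omega), if_pos (by omega)]
      have hgetA : PySem.List.pyGetD arr (k : Int) 0 = arr.getD k 0 :=
        PySem.List.pyGetD_natCast arr k 0
      have hk' : k - 1 + 1 = k := by omega
      have hEk := hE (k - 1) (by omega)
      have hOk := hO (k - 1) (by omega)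
      rw [hk'] at hEk hOk
      simp only [List.foldl_cons, List.foldl_nil, pvStepA, hmod, hgetE, hgetO, hgetA,
        PySem.List.pySetD_natCast]
      by_cases hpar : k % 2 = 0
      · rw [if_pos (by simp [hpar])]
        rw [if_pos hpar] at hEk hOk
        rw [pvState_set _ _ _ _ hkn hEk.symm, pvState_set _ _ _ _ hkn hOk.symm]
      · have h1 : k % 2 = 1 := by omega
        rw [if_neg (by simp [h1])]
        rw [if_neg hpar] at hEk hOk
        rw [pvState_set _ _ _ _ hkn hEk.symm, pvState_set _ _ _ _ hkn hOk.symm]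

-- ===== VERDICT (by name: the statement is the Claim_ definition above) =====
theorem createPrefixSumArrays_spec : Claim_equal_createPrefixSumArrays := by
  intro arr _ hpre
  unfold Spec_createPrefixSumArrays
  have hn : 0 < arr.length := List.length_pos_iff.mpr hpre
  have hget0 : PySem.List.pyGet? arr 0 = some (arr.getD 0 0) := by
    cases arr with
    | nil => simp at hn
    | cons a t => simp [PySem.List.pyGet?, PySem.List.pyIdx?]
  set evenVals : List Int :=
    (PySem.List.enumerate arr).map (fun p => if PySem.Int.mod p.1 2 = 0 then p.2 else 0) with hev
  set oddVals : List Int :=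
    (PySem.List.enumerate arr).map (fun p => if PySem.Int.mod p.1 2 = 0 then 0 else p.2) with hov
  have hevl : evenVals.length = arr.length := by simp [hev, PySem.List.length_enumerate]
  have hovl : oddVals.length = arr.length := by simp [hov, PySem.List.length_enumerate]
  set E : List Int := pvScan 0 evenVals with hE
  set O : List Int := pvScan 0 oddVals with hO
  have hmodc : ∀ j : Nat, PySem.Int.mod (j : Int) 2 = (((j % 2 : Nat)) : Int) := fun j => by
    exact_mod_cast PySem.Int.mod_natCast j 2
  have hevg : ∀ j : Nat, (hj : j < arr.length) →
      evenVals.getD j 0 = if j % 2 = 0 then arr.getD j 0 else 0 := by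
    intro j hj
    rw [hev, pvMask_getD arr _ j hj]
    simp only [hmodc j, List.getD_eq_getElem arr 0 hj]
    by_cases h : j % 2 = 0
    · simp [h]
    · have h1 : j % 2 = 1 := by omega
      simp [h1]
  have hovg : ∀ j : Nat, (hj : j < arr.length) →
      oddVals.getD j 0 = if j % 2 = 0 then 0 else arr.getD j 0 := by
    intro j hj
    rw [hov, pvMask_getD arr _ j hj]
    simp only [hmodc j, List.getD_eq_getElem arr 0 hj]
    by_cases h : j % 2 = 0
    · simp [h]
    · have h1 : j % 2 = 1 := by omega
      simp [h1]
  have hErec : ∀ j : Nat, j + 1 < arr.length →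
      E.getD (j + 1) 0 = if (j + 1) % 2 = 0 then E.getD j 0 + arr.getD (j + 1) 0 else E.getD j 0 := by
    intro j hj
    rw [hE, pvScan_getD_succ evenVals j (by omega), hevg (j + 1) hj]
    split_ifs <;> ring
  have hOrec : ∀ j : Nat, j + 1 < arr.length →
      O.getD (j + 1) 0 = if (j + 1) % 2 = 0 then O.getD j 0 else O.getD j 0 + arr.getD (j + 1) 0 := by
    intro j hj
    rw [hO, pvScan_getD_succ oddVals j (by omega), hovg (j + 1) hj]
    split_ifs <;> ring
  have hE0 : E.getD 0 0 = arr.getD 0 0 := by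
    have h0 : (0 : Nat) < evenVals.length := by omega
    rw [hE, pvScan_getD evenVals 0 0 h0, List.sum_take_succ evenVals 0 h0]
    have := hevg 0 hn
    rw [List.getD_eq_getElem _ _ h0] at this
    simpa using this
  have hO0 : O.getD 0 0 = 0 := by
    have h0 : (0 : Nat) < oddVals.length := by omega
    rw [hO, pvScan_getD oddVals 0 0 h0, List.sum_take_succ oddVals 0 h0]
    have := hovg 0 hn
    rw [List.getD_eq_getElem _ _ h0] at this
    simpa using this
  have hloop := pv_loop_inv arr E O (by rw [hE, pvScan_length]; exact hevl)
    (by rw [hO, pvScan_length]; exact hovl) hErec hOrec arr.length hn le_rfl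
  show createPrefixSumArrays arr = _
  unfold createPrefixSumArrays createPrefixSumArrays_alt
  rw [hget0]
  change List.foldl (pvStepA arr)
      (PySem.List.pySetD (List.replicate arr.length 0) 0 (arr.getD 0 0),
        PySem.List.pySetD (List.replicate arr.length 0) 0 0)
      (PySem.List.pyRange 1 (arr.length : Int) 1)
    = (pvRunning evenVals, pvRunning oddVals)
  have hset : ∀ v : Int, PySem.List.pySetD (List.replicate arr.length (0 : Int)) 0 v
      = (List.replicate arr.length (0 : Int)).set 0 v := fun v =>
    PySem.List.pySetD_natCast _ 0 v
  have hinitE := pvState_init arr.length E hn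
  rw [hE0] at hinitE
  have hinitO := pvState_init arr.length O hn
  rw [hO0] at hinitO
  rw [hset, hset, hinitE, hinitO,
      hloop, pvState_full arr.length E (by rw [hE, pvScan_length]; exact hevl),
      pvState_full arr.length O (by rw [hO, pvScan_length]; exact hovl),
      hE, hO, ← pvRunning_eq_scan, ← pvRunning_eq_scan]
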